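-- pv_equiv track=rewrite | github.com/whealy11/carbon_credit_simulation | third_pass.py | _allocate_from_sorted
-- ===== SOURCE A (Python) =====
-- def _allocate_from_sorted(bids_sorted, total_credits):
--     winners, idx = [], 0
--     while total_credits > 0 and idx < len(bids_sorted):
--         price, ag, q = bids_sorted[idx]
--         take = q if q <= total_credits else total_credits
--         winners.append((price, ag, take))
--         total_credits -= take
--         idx += 1
--     return winners, bids_sorted[idx:]
-- ===== SOURCE B (Python) =====
-- def _allocate_from_sorted(bids_sorted, total_credits):
--     # Prefix-sum the quantities, find the first index whose cumulative sum
--     # reaches total_credits, then assemble the answer by slicing.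
--     if total_credits <= 0:
--         return [], list(bids_sorted)
--     cums = [0]
--     for _, _, q in bids_sorted:
--         cums.append(cums[-1] + q)
--     j = next((i for i in range(len(bids_sorted)) if cums[i + 1] >= total_credits), None)
--     if j is None:
--         return list(bids_sorted), []
--     price, ag, _ = bids_sorted[j]
--     return bids_sorted[:j] + [(price, ag, total_credits - cums[j])], bids_sorted[j + 1:]
-- ===== Notes on version B (the rewrite author's own statement) =====
-- stated objective: alternative
-- what changed: Replaces the running-remainder while-loop that appends winners one by one with a prefix-sum table plus a first-crossing split index, assembling both result lists by slicing.
import Mathlib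
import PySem

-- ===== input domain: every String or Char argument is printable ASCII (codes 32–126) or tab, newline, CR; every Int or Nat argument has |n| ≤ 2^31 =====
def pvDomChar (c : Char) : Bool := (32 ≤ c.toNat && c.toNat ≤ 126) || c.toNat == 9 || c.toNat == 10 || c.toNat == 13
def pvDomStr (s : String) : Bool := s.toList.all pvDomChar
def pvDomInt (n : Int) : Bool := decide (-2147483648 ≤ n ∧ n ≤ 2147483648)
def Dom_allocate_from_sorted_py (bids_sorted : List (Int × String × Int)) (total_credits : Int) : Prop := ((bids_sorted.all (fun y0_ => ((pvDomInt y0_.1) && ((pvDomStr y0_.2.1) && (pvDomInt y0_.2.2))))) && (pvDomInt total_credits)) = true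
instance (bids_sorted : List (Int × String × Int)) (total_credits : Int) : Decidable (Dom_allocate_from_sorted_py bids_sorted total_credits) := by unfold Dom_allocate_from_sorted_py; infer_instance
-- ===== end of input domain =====

-- B computes the split point from a prefix-sum table and slices, instead of A's running-remainder append loop (alternative decomposition, same O(n) cost).


-- ===== PORT A =====
-- A's while loop: the suffix bids_sorted[idx:] is carried as `rest`, winners accumulate in order.
def pvGoA (total : Int) (winners : List (Int × String × Int)) (rest : List (Int × String × Int)) : (List (Int × String × Int)) × (List (Int × String × Int)) :=
  if total > 0 then
    match rest with
    | [] => (winners, [])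
    | (price, ag, q) :: rs =>
      let take := if q ≤ total then q else total
      pvGoA (total - take) (winners ++ [(price, ag, take)]) rs
  else (winners, rest)
termination_by rest.length

def allocate_from_sorted_py (bids_sorted : List (Int × String × Int)) (total_credits : Int) : (List (Int × String × Int)) × (List (Int × String × Int)) :=
  pvGoA total_credits [] bids_sorted

-- ===== PORT B =====
-- the `for` loop building cums (after the leading 0): each step appends last + q
def pvCumsGo (last : Int) : List Int → List Int
  | [] => []
  | q :: qs => (last + q) :: pvCumsGo (last + q) qs

-- first index i with l[i] ≥ t (Source B's next(... if cums[i+1] >= total_credits), scanning cums[1:])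
def pvFirstGE (t : Int) : List Int → Option Nat
  | [] => none
  | c :: cs => if t ≤ c then some 0 else (pvFirstGE t cs).map (· + 1)

def allocate_from_sorted_py_alt (bids_sorted : List (Int × String × Int)) (total_credits : Int) : (List (Int × String × Int)) × (List (Int × String × Int)) :=
  if total_credits ≤ 0 then ([], bids_sorted)
  else
    let cums : List Int := 0 :: pvCumsGo 0 (bids_sorted.map (fun b => b.2.2))
    match pvFirstGE total_credits cums.tail with
    | none => (bids_sorted, [])
    | some j =>
      -- cums[j] and bids_sorted[j]: j is in range here, so getD is exact
      let prev := cums.getD j 0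
      match bids_sorted.getD j (0, "", 0) with
      | (price, ag, _) => (bids_sorted.take j ++ [(price, ag, total_credits - prev)], bids_sorted.drop (j + 1))

-- ===== PRECONDITION & SPEC =====
def Spec_allocate_from_sorted_py (bids_sorted : List (Int × String × Int)) (total_credits : Int) (out : (List (Int × String × Int)) × (List (Int × String × Int))) : Prop := out = allocate_from_sorted_py_alt bids_sorted total_credits
instance (bids_sorted : List (Int × String × Int)) (total_credits : Int) (out : (List (Int × String × Int)) × (List (Int × String × Int))) : Decidable (Spec_allocate_from_sorted_py bids_sorted total_credits out) := by unfold Spec_allocate_from_sorted_py; infer_instance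

-- ===== CLAIM (what is proved, stated in full; the proofs are below) =====
def Claim_equal_allocate_from_sorted_py : Prop := ∀ (bids_sorted : List (Int × String × Int)) (total_credits : Int), Dom_allocate_from_sorted_py bids_sorted total_credits → Spec_allocate_from_sorted_py bids_sorted total_credits (allocate_from_sorted_py bids_sorted total_credits)

-- ===== LEMMAS AND PROOFS =====

theorem pvCumsGo_shift (qs : List Int) : ∀ (a b : Int), pvCumsGo (a + b) qs = (pvCumsGo b qs).map (a + ·) := by
  induction qs with
  | nil => intro a b; rfl
  | cons q qs ih =>
    intro a b
    simp only [pvCumsGo, List.map]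
    rw [show a + b + q = a + (b + q) by ring, ih a (b + q)]

theorem pvFirstGE_map_shift (l : List Int) : ∀ (t a : Int), pvFirstGE t (l.map (a + ·)) = pvFirstGE (t - a) l := by
  induction l with
  | nil => intro t a; rfl
  | cons c cs ih =>
    intro t a
    simp only [List.map, pvFirstGE]
    by_cases h' : t - a ≤ c
    · rw [if_pos (by omega), if_pos h']
    · rw [if_neg (by omega), if_neg h', ih]

theorem pvFirstGE_lt_length (t : Int) (l : List Int) (j : ℕ) (h : pvFirstGE t l = some j) : j < l.length := by
  induction l generalizing j with
  | nil => simp [pvFirstGE] at h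
  | cons c cs ih =>
    simp only [pvFirstGE] at h
    split at h
    · cases h; simp
    · cases hrec : pvFirstGE t cs with
      | none => rw [hrec] at h; simp at h
      | some j' =>
        rw [hrec] at h
        simp at h
        have := ih j' hrec
        simp [← h]
        omega

theorem getD_map_add (l : List Int) : ∀ (j : ℕ) (a : Int), j < l.length → (l.map (a + ·)).getD j 0 = a + l.getD j 0 := by
  induction l with
  | nil => intro j a h; simp at h
  | cons c cs ih =>
    intro j a h
    cases j with
    | zero => rfl
    | succ j' =>
      simp only [List.map, List.getD_cons_succ]
      exact ih j' a (by simpa using h)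

theorem pvGoA_eq_alt (bids : List (Int × String × Int)) : ∀ (total : Int) (w : List (Int × String × Int)),
    pvGoA total w bids = (w ++ (allocate_from_sorted_py_alt bids total).1, (allocate_from_sorted_py_alt bids total).2) := by
  induction bids with
  | nil =>
    intro total w
    unfold pvGoA allocate_from_sorted_py_alt
    by_cases h : total ≤ 0
    · simp [h, not_lt.mpr h]
    · simp [h, lt_of_not_ge h, pvCumsGo, pvFirstGE]
  | cons b rs ih =>
    intro total w
    obtain ⟨p, a, q⟩ := b
    by_cases h : total ≤ 0
    · unfold pvGoA allocate_from_sorted_py_alt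
      simp [h, not_lt.mpr h]
    · have htot : total > 0 := lt_of_not_ge h
      have hmapgo : pvCumsGo q (rs.map (fun b => b.2.2)) = (pvCumsGo 0 (rs.map (fun b => b.2.2))).map (q + ·) := by
        have := pvCumsGo_shift (rs.map (fun b => b.2.2)) q 0
        simpa using this
      have hfge : pvFirstGE total (pvCumsGo q (rs.map (fun b => b.2.2))) = pvFirstGE (total - q) (pvCumsGo 0 (rs.map (fun b => b.2.2))) := by
        rw [hmapgo, pvFirstGE_map_shift]
      by_cases hq : total ≤ q
      · -- crossing at index 0: A takes `total` here and stops
        have htake : (if q ≤ total then q else total) = total := by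
          by_cases h' : q ≤ total <;> simp [h'] ; omega
        rw [pvGoA.eq_def]
        simp only [if_pos htot, htake, sub_self]
        rw [pvGoA.eq_def]
        simp only [lt_irrefl, if_false]
        unfold allocate_from_sorted_py_alt
        simp [h, pvCumsGo, pvFirstGE, hq]
      · -- q < total: A takes q in full and recurses with total - q
        have hq' : q < total := lt_of_not_ge hq
        have htake : (if q ≤ total then q else total) = q := by simp [le_of_lt hq']
        have hrec : pvGoA total w ((p, a, q) :: rs)
            = pvGoA (total - q) (w ++ [(p, a, q)]) rs := by
          rw [pvGoA]; simp [htot, htake]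
        rw [hrec, ih (total - q) (w ++ [(p, a, q)])]
        have hsub0 : ¬ (total - q ≤ 0) := by omega
        -- unfold alt on both sides
        conv_rhs => rw [allocate_from_sorted_py_alt]
        conv_lhs => rw [allocate_from_sorted_py_alt]
        simp only [h, hsub0, List.map_cons, pvCumsGo, List.tail_cons, zero_add]
        rw [show pvFirstGE total (q :: pvCumsGo q (List.map (fun b => b.2.2) rs))
              = if total ≤ q then some 0 else (pvFirstGE total (pvCumsGo q (List.map (fun b => b.2.2) rs))).map (· + 1) from rfl]
        rw [if_neg hq, hfge]
        cases hj : pvFirstGE (total - q) (pvCumsGo 0 (List.map (fun b => b.2.2) rs)) with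
        | none => simp
        | some j' =>
          have hjlt : j' < (pvCumsGo 0 (List.map (fun b => b.2.2) rs)).length := pvFirstGE_lt_length _ _ _ hj
          simp only [Option.map_some]
          have hprev : (0 :: q :: pvCumsGo q (List.map (fun b => b.2.2) rs)).getD (j' + 1) 0
              = q + (0 :: pvCumsGo 0 (List.map (fun b => b.2.2) rs)).getD j' 0 := by
            have : (q :: pvCumsGo q (List.map (fun b => b.2.2) rs))
                = ((0 :: pvCumsGo 0 (List.map (fun b => b.2.2) rs)).map (q + ·)) := by
              simp [hmapgo]
            rw [List.getD_cons_succ, this]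
            exact getD_map_add _ j' q (by simp; omega)
          rw [hprev]
          have hgetbids : ((p, a, q) :: rs).getD (j' + 1) (0, "", 0) = rs.getD j' (0, "", 0) := rfl
          rw [hgetbids]
          rcases hb : rs.getD j' (0, "", 0) with ⟨pj, aj, qj⟩
          simp [List.take_succ_cons, List.drop_succ_cons]
          omega

-- ===== VERDICT (by name: the statement is the Claim_ definition above) =====
theorem allocate_from_sorted_py_spec : Claim_equal_allocate_from_sorted_py := by
  intro bids total _
  unfold Spec_allocate_from_sorted_py allocate_from_sorted_py
  rw [pvGoA_eq_alt]
  simp
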